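-- pv_equiv track=rewrite | github.com/yannick-cousin1/starter-python | job22.py | myUper
-- ===== SOURCE A (Python) =====
-- def myUper(string):
-- 	lowercase = "abcdefghijklmnopqrstuvwxyz"
-- 	uppercase = "ABCDEFGHIJKLMNOPQRSTUVWXYZ"
-- 	uppered = '' #will be the string to return at the end
--
-- 	#for each char in the string
-- 	for c in string:
-- 		#if the char is a whitespace, append it to "uppered"
-- 		if c == " ":
-- 			uppered += c
-- 		#loop to compare each char with lowercase table and upercase table
-- 		for x in range(26):
-- 			#if current char is a lowercase char, use the same char in uppercase table and append it to "uppered"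
-- 			if c == lowercase[x]:
-- 				uppered += uppercase[x]
-- 			#if current char is an uppercase char, append it directly to "uppered"
-- 			elif c == uppercase[x]:
-- 				uppered += c
-- 	return uppered
-- ===== SOURCE B (Python) =====
-- def myUper(string):
--     # Pass 1: keep only characters that survive (space and ASCII letters).
--     kept = [c for c in string if c == ' ' or 'A' <= c <= 'Z' or 'a' <= c <= 'z']
--     # Pass 2: uppercase by code arithmetic (no lookup table at all).
--     return ''.join(c if c < 'a' else chr(ord(c) - 32) for c in kept)
-- ===== Notes on version B (the rewrite author's own statement) =====
-- stated objective: simpler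
-- what changed: Drops A's 26-entry table scan entirely: B does two staged passes, a filter keeping space and ASCII letters by range comparison, then uppercasing lowercase letters by code arithmetic chr(ord(c)-32) -- no tables or lookups at all.
import Mathlib
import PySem

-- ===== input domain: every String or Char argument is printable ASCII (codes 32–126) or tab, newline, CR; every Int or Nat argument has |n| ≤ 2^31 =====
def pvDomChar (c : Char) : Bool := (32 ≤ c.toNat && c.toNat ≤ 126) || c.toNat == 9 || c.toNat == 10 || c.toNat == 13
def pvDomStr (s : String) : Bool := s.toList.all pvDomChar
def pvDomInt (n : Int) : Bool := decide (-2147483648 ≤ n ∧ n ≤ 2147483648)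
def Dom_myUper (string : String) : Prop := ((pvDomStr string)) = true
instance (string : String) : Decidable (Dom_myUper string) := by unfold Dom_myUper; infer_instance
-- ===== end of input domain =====

-- B replaces A's per-character 26-step table scan by two staged passes: a range-comparison filter, then uppercasing via code arithmetic (no tables); objective: simpler.


-- ===== PORT A =====
def pvLower : List Char := "abcdefghijklmnopqrstuvwxyz".toList
def pvUpper : List Char := "ABCDEFGHIJKLMNOPQRSTUVWXYZ".toList

-- literal port of A: per char, maybe append the space, then scan x in range(26)
-- (indexing lowercase[x]/uppercase[x] via pyGetD: x is always in range, so the default is never used)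
def myUper (string : String) : String :=
  String.mk (string.toList.foldl (fun uppered c =>
    let uppered := if c = ' ' then uppered ++ [c] else uppered
    (PySem.List.pyRange 0 26 1).foldl (fun acc x =>
      if c = PySem.List.pyGetD pvLower x ' ' then acc ++ [PySem.List.pyGetD pvUpper x ' ']
      else if c = PySem.List.pyGetD pvUpper x ' ' then acc ++ [c]
      else acc) uppered) [])

-- ===== PORT B =====
-- pass 1: keep space and ASCII letters (range comparisons); pass 2: uppercase by code arithmetic
def pvKeep (c : Char) : Bool := c = ' ' || ('A' ≤ c && c ≤ 'Z') || ('a' ≤ c && c ≤ 'z')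

def myUper_alt (string : String) : String :=
  let kept := string.toList.filter pvKeep
  String.mk (kept.map (fun c => if c < 'a' then c else Char.ofNat (c.toNat - 32)))

-- ===== PRECONDITION & SPEC =====
def Spec_myUper (string : String) (out : String) : Prop := out = myUper_alt string
instance (string : String) (out : String) : Decidable (Spec_myUper string out) := by unfold Spec_myUper; infer_instance

-- ===== CLAIM (what is proved, stated in full; the proofs are below) =====
def Claim_equal_myUper : Prop := ∀ (string : String), Dom_myUper string → Spec_myUper string (myUper string)

-- ===== LEMMAS AND PROOFS =====

-- what A emits for one character
def pvPieceA (c : Char) : List Char :=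
  (if c = ' ' then [c] else []) ++
    (PySem.List.pyRange 0 26 1).flatMap (fun x =>
      if c = PySem.List.pyGetD pvLower x ' ' then [PySem.List.pyGetD pvUpper x ' ']
      else if c = PySem.List.pyGetD pvUpper x ' ' then [c]
      else [])

-- what B emits for one character
def pvPieceB (c : Char) : List Char :=
  if pvKeep c then [if c < 'a' then c else Char.ofNat (c.toNat - 32)] else []

lemma pvStepA_eq (uppered : List Char) (c : Char) :
    (let uppered := if c = ' ' then uppered ++ [c] else uppered
     (PySem.List.pyRange 0 26 1).foldl (fun acc x =>
      if c = PySem.List.pyGetD pvLower x ' ' then acc ++ [PySem.List.pyGetD pvUpper x ' ']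
      else if c = PySem.List.pyGetD pvUpper x ' ' then acc ++ [c]
      else acc) uppered) = uppered ++ pvPieceA c := by
  have h : (fun (acc : List Char) (x : Int) =>
      if c = PySem.List.pyGetD pvLower x ' ' then acc ++ [PySem.List.pyGetD pvUpper x ' ']
      else if c = PySem.List.pyGetD pvUpper x ' ' then acc ++ [c]
      else acc)
      = (fun (acc : List Char) (x : Int) => acc ++
        (if c = PySem.List.pyGetD pvLower x ' ' then [PySem.List.pyGetD pvUpper x ' ']
         else if c = PySem.List.pyGetD pvUpper x ' ' then [c]
         else [])) := by
    funext acc x; split_ifs <;> simp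
  simp only [h, PySem.List.foldl_append_eq_flatMap, pvPieceA]
  split_ifs <;> simp

set_option maxRecDepth 20000 in
lemma pvPiece_eq_of_lt (c : Char) (hc : c.toNat < 127) : pvPieceA c = pvPieceB c := by
  have key : ((List.range 127).all (fun n => pvPieceA (Char.ofNat n) == pvPieceB (Char.ofNat n))) = true := by rfl
  have h := List.all_eq_true.mp key c.toNat (List.mem_range.mpr hc)
  rw [beq_iff_eq] at h
  simpa [Char.ofNat_toNat] using h

lemma pvCharLt127 (c : Char) (h : pvDomChar c = true) : c.toNat < 127 := by
  simp [pvDomChar] at h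
  omega

lemma pvFoldA (l : List Char) (acc : List Char) :
    l.foldl (fun uppered c =>
      let uppered := if c = ' ' then uppered ++ [c] else uppered
      (PySem.List.pyRange 0 26 1).foldl (fun a x =>
        if c = PySem.List.pyGetD pvLower x ' ' then a ++ [PySem.List.pyGetD pvUpper x ' ']
        else if c = PySem.List.pyGetD pvUpper x ' ' then a ++ [c]
        else a) uppered) acc = acc ++ l.flatMap pvPieceA := by
  have h : (fun (uppered : List Char) (c : Char) =>
      let uppered := if c = ' ' then uppered ++ [c] else uppered
      (PySem.List.pyRange 0 26 1).foldl (fun a x =>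
        if c = PySem.List.pyGetD pvLower x ' ' then a ++ [PySem.List.pyGetD pvUpper x ' ']
        else if c = PySem.List.pyGetD pvUpper x ' ' then a ++ [c]
        else a) uppered) = fun uppered c => uppered ++ pvPieceA c :=
    funext fun u => funext fun c => pvStepA_eq u c
  rw [h, PySem.List.foldl_append_eq_flatMap]

-- B's filter-then-map, as a per-character flatMap of pvPieceB
lemma pvFilterMap_eq (l : List Char) :
    (l.filter pvKeep).map (fun c => if c < 'a' then c else Char.ofNat (c.toNat - 32))
      = l.flatMap pvPieceB := by
  induction l with
  | nil => rfl
  | cons c t ih =>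
    by_cases h : pvKeep c = true <;>
      simp [List.flatMap_cons, pvPieceB, h, ih]

lemma pvFlatMap_eq (l : List Char) (h : l.all pvDomChar = true) :
    l.flatMap pvPieceA = l.flatMap pvPieceB := by
  induction l with
  | nil => simp
  | cons c t ih =>
    simp only [List.all_cons, Bool.and_eq_true] at h
    simp [List.flatMap_cons, pvPiece_eq_of_lt c (pvCharLt127 c h.1), ih h.2]

-- ===== VERDICT (by name: the statement is the Claim_ definition above) =====
theorem myUper_spec : Claim_equal_myUper := by
  intro s hdom
  unfold Spec_myUper myUper myUper_alt
  rw [pvFoldA, pvFlatMap_eq _ hdom, ← pvFilterMap_eq]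
  simp
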